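-- pv_equiv track=rewrite | github.com/harjothkhara/computer-science | Intro-Python-I/lecture_day2.py | centered_average
-- ===== SOURCE A (Python) =====
-- def centered_average(nums):
--     min_num = nums[0]  # initializing min
--     max_num = nums[0]  # initializing max
--     total = 0  # running total
--     for n in nums:
--         total += n
--         if n < min_num:
--             min_num = n
--         if n > max_num:
--             max_num = n
--     return (total - min_num - max_num) // (len(nums) - 2)
--
-- nums = [1, 2, 3, 4, 100]
-- ===== SOURCE B (Python) =====
-- def centered_average(nums):
--     s = sorted(nums)
--     return sum(s[1:-1]) // (len(s) - 2)
-- ===== Notes on version B (the rewrite author's own statement) =====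
-- stated objective: alternative
-- what changed: Replaces the running total/min/max accumulator loop with sort-then-trim: sort the list and average the middle slice s[1:-1], which drops one minimal and one maximal element instead of subtracting tracked extrema.
-- outside the precondition, e.g. on centered_average([]): A raises IndexError, B returns 0; on centered_average([5]): A returns 5, B returns 0; on centered_average([1, 2]): A raises ZeroDivisionError, B raises ZeroDivisionError
import Mathlib
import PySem

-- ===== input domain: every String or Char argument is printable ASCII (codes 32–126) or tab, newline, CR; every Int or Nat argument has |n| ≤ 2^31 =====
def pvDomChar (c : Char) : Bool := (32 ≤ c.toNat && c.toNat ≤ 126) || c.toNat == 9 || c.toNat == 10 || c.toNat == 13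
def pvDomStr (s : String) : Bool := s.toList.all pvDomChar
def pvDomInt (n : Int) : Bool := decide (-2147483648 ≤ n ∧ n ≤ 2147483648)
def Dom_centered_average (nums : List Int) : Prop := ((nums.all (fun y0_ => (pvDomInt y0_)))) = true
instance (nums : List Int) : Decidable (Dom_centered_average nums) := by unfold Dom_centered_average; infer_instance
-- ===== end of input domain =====

-- B replaces A's running total/min/max loop with sort-then-trim: sort and average the middle slice s[1:-1] (alternative algorithm).

-- ===== PORT A =====
-- A reads nums[0] (IndexError on []) and divides by len(nums)-2 (ZeroDivisionError at length 2);
-- both are excluded by Pre_ below, so the [] branch value here is never claimed.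
def centered_average (nums : List Int) : Int :=
  match nums with
  | [] => 0
  | h :: _ =>
    let st := nums.foldl
      (fun (st : Int × Int × Int) n =>
        (st.1 + n, (if n < st.2.1 then n else st.2.1), (if n > st.2.2 then n else st.2.2)))
      (0, h, h)
    PySem.Int.floordiv (st.1 - st.2.1 - st.2.2) ((nums.length : Int) - 2)

-- ===== PORT B =====
-- sorted(nums) → PySem.List.sorted; s[1:-1] → PySem.List.slice s 1 (-1); '//' → PySem.Int.floordiv.
def centered_average_alt (nums : List Int) : Int :=
  let s := PySem.List.sorted nums (fun x => x) false
  PySem.Int.floordiv (PySem.List.slice s (some 1) (some (-1))).sum ((s.length : Int) - 2)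

-- ===== PRECONDITION & SPEC =====
-- Pre_ excludes [] (A raises IndexError, B returns 0), length 2 (both raise ZeroDivisionError), and
-- singletons, a corner where the task is undefined and A's value n (from (-n)//(-1)) and B's 0 are both accidental.
def Pre_centered_average (nums : List Int) : Prop := 3 ≤ nums.length
instance (nums : List Int) : Decidable (Pre_centered_average nums) := by unfold Pre_centered_average; infer_instance
def pvWitness_centered_average : List Int := [1, 2, 3, 4, 100]

def Spec_centered_average (nums : List Int) (out : Int) : Prop := out = centered_average_alt nums
instance (nums : List Int) (out : Int) : Decidable (Spec_centered_average nums out) := by unfold Spec_centered_average; infer_instance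

-- ===== CLAIM (what is proved, stated in full; the proofs are below) =====
def Claim_equal_centered_average : Prop := ∀ (nums : List Int), Dom_centered_average nums → Pre_centered_average nums → Spec_centered_average nums (centered_average nums)

-- ===== LEMMAS AND PROOFS =====
theorem min_ite (m x : Int) : (if x < m then x else m) = min m x := by
  split_ifs <;> omega

theorem max_ite (M x : Int) : (if x > M then x else M) = max M x := by
  split_ifs <;> omega

-- A's loop computes (sum, foldl min, foldl max).
theorem fold_char (l : List Int) (t m M : Int) :
    l.foldl
      (fun (st : Int × Int × Int) n =>
        (st.1 + n, (if n < st.2.1 then n else st.2.1), (if n > st.2.2 then n else st.2.2)))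
      (t, m, M) = (t + l.sum, l.foldl min m, l.foldl max M) := by
  induction l generalizing t m M with
  | nil => simp
  | cons x xs ih =>
    rw [List.foldl_cons, ih, List.sum_cons, min_ite, max_ite]
    congr 1
    omega

theorem foldl_min_mem (t : List Int) (h : Int) : t.foldl min h ∈ h :: t := by
  induction t generalizing h with
  | nil => simp
  | cons x xs ih =>
    rw [List.foldl_cons]
    rcases min_choice h x with hc | hc <;> rw [hc]
    · have hmem := ih h
      simp only [List.mem_cons] at hmem ⊢
      tauto
    · have hmem := ih x
      simp only [List.mem_cons] at hmem ⊢
      tauto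

theorem foldl_min_le (t : List Int) (h : Int) : ∀ x ∈ h :: t, t.foldl min h ≤ x := by
  induction t generalizing h with
  | nil => simp
  | cons y ys ih =>
    intro x hx
    have hkey : ys.foldl min (min h y) ≤ min h y := ih (min h y) _ (by simp)
    rw [List.foldl_cons]
    simp only [List.mem_cons] at hx
    rcases hx with rfl | rfl | hx
    · exact le_trans hkey (min_le_left _ _)
    · exact le_trans hkey (min_le_right _ _)
    · exact ih (min h y) x (by simp [hx])

theorem foldl_max_mem (t : List Int) (h : Int) : t.foldl max h ∈ h :: t := by
  induction t generalizing h with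
  | nil => simp
  | cons x xs ih =>
    rw [List.foldl_cons]
    rcases max_choice h x with hc | hc <;> rw [hc]
    · have hmem := ih h
      simp only [List.mem_cons] at hmem ⊢
      tauto
    · have hmem := ih x
      simp only [List.mem_cons] at hmem ⊢
      tauto

theorem foldl_le_max (t : List Int) (h : Int) : ∀ x ∈ h :: t, x ≤ t.foldl max h := by
  induction t generalizing h with
  | nil => simp
  | cons y ys ih =>
    intro x hx
    have hkey : max h y ≤ ys.foldl max (max h y) := ih (max h y) _ (by simp)
    rw [List.foldl_cons]
    simp only [List.mem_cons] at hx
    rcases hx with rfl | rfl | hx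
    · exact le_trans (le_max_left _ _) hkey
    · exact le_trans (le_max_right _ _) hkey
    · exact ih (max h y) x (by simp [hx])

-- slicing off the first and last element of an explicitly decomposed list
theorem slice_one_neg_one (a b : Int) (u : List Int) :
    PySem.List.slice (a :: u ++ [b]) (some 1) (some (-1)) = u := by
  have : PySem.List.slice (a :: u ++ [b]) (some 1) (some (-1)) =
      ((a :: u ++ [b]).drop 1).take u.length := by
    simp [PySem.List.slice]
  rw [this]
  simp

-- ===== VERDICT (by name: the statement is the Claim_ definition above) =====
theorem centered_average_spec : Claim_equal_centered_average := by
  intro nums _ hpre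
  unfold Pre_centered_average at hpre
  unfold Spec_centered_average centered_average centered_average_alt
  cases nums with
  | nil => simp at hpre
  | cons h t =>
    dsimp only
    rw [fold_char]
    dsimp only
    set s := PySem.List.sorted (h :: t) (fun x => x) false with hs
    have hperm : s.Perm (h :: t) := PySem.List.sorted_perm _ _ _
    have hlens : s.length = (h :: t).length := hperm.length_eq
    have hlen3 : 3 ≤ s.length := by rw [hlens]; exact hpre
    -- decompose s = a :: u ++ [b]
    obtain ⟨a, r, hsr⟩ : ∃ a r, s = a :: r := by
      cases hse : s with
      | nil => rw [hse] at hlen3; simp at hlen3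
      | cons a r => exact ⟨a, r, rfl⟩
    obtain ⟨u, b, hrb⟩ : ∃ u b, r = u ++ [b] := by
      rcases List.eq_nil_or_concat r with hr | ⟨u, b, hub⟩
      · rw [hsr, hr] at hlen3; simp at hlen3
      · exact ⟨u, b, by simpa using hub⟩
    have hS : s = a :: u ++ [b] := by rw [hsr, hrb]; rfl
    -- the head of the sorted list is A's running minimum
    have hmin : a = t.foldl min h := by
      have hbound : ∀ y ∈ (h :: t), a ≤ y :=
        PySem.List.key_head_sorted_le (h :: t) (fun x => x) (by rw [← hs, hsr])
      have h1 : a ≤ t.foldl min h := hbound _ (foldl_min_mem t h)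
      have h2 : t.foldl min h ≤ a :=
        foldl_min_le t h a (hperm.mem_iff.mp (by rw [hsr]; simp))
      omega
    -- the last element of the sorted list is A's running maximum
    have hpw : s.Pairwise (fun x y => x ≤ y) := by
      have := PySem.List.sorted_pairwise (h :: t) (fun x => x)
      rw [← hs] at this; exact this
    have hmax : b = t.foldl max h := by
      have hbound : ∀ y ∈ s, y ≤ b := by
        intro y hy
        rw [hS, show (a :: u ++ [b]) = (a :: u) ++ [b] from rfl] at hpw hy
        rcases List.mem_append.mp hy with hy | hy
        · exact (List.pairwise_append.mp hpw).2.2 y hy b (by simp)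
        · simp at hy; omega
      have h1 : t.foldl max h ≤ b := hbound _ (hperm.mem_iff.mpr (foldl_max_mem t h))
      have h2 : b ≤ t.foldl max h :=
        foldl_le_max t h b (hperm.mem_iff.mp (by rw [hS]; simp))
      omega
    -- the sorted list is a permutation, so the sums agree
    have hsum : a + u.sum + b = h + t.sum := by
      have := hperm.sum_eq
      rw [hS] at this
      simp only [List.cons_append, List.sum_cons, List.sum_append, List.sum_nil] at this
      omega
    rw [hS, slice_one_neg_one]
    have hlen2 : ((a :: u ++ [b]).length : Int) = ((h :: t).length : Int) := by
      rw [← hS, hlens]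
    rw [hlen2]
    simp only [List.foldl_cons, min_self, max_self, zero_add, List.sum_cons]
    rw [← hmin, ← hmax]
    congr 1
    omega
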